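-- pv_equiv track=rewrite | github.com/dzhou6/SPEED | backend/app/matching.py | _norm_availability
-- ===== SOURCE A (Python) =====
-- from typing import Any, Dict, List, Optional, Sequence, Tuple, Union
--
-- DAY_TO_IDX = {"Mon": 0, "Tue": 1, "Wed": 2, "Thu": 3, "Fri": 4, "Sat": 5, "Sun": 6}
--
-- BLOCK_TO_RANGE = {
--     "morning": (9 * 60, 12 * 60),
--     "afternoon": (12 * 60, 17 * 60),
--     "evening": (17 * 60, 21 * 60),
--     "night": (21 * 60, 24 * 60),  # not currently used, but safe
-- }
--
-- def _norm_availability(avail: Sequence[Any]) -> List[Tuple[int, int]]: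
--     intervals: List[Tuple[int, int]] = []
--
--     for item in avail or []:
--         s = str(item).strip()
--         if not s:
--             continue
--         parts = s.split()
--         if len(parts) != 2:
--             continue
--
--         day, block = parts[0], parts[1].lower()
--         if day in DAY_TO_IDX and block in BLOCK_TO_RANGE:
--             base = DAY_TO_IDX[day] * 1440
--             s0, e0 = BLOCK_TO_RANGE[block]
--             intervals.append((base + s0, base + e0))
--
--     return _merge_intervals(sorted(intervals))
--
-- def _merge_intervals(intervals: List[Tuple[int, int]]) -> List[Tuple[int, int]]:
--     if not intervals:
--         return []
--     merged = [intervals[0]]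
--     for s, e in intervals[1:]:
--         ps, pe = merged[-1]
--         if s <= pe:
--             merged[-1] = (ps, max(pe, e))
--         else:
--             merged.append((s, e))
--     return merged
-- ===== SOURCE B (Python) =====
-- from typing import Any, List, Sequence, Tuple
--
-- DAY_TO_IDX = {"Mon": 0, "Tue": 1, "Wed": 2, "Thu": 3, "Fri": 4, "Sat": 5, "Sun": 6}
--
-- BLOCK_TO_RANGE = {
--     "morning": (9 * 60, 12 * 60),
--     "afternoon": (12 * 60, 17 * 60),
--     "evening": (17 * 60, 21 * 60),
--     "night": (21 * 60, 24 * 60),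
-- }
--
-- _BLOCK_ORDER = ["morning", "afternoon", "evening", "night"]
--
-- def _norm_availability(avail: Sequence[Any]) -> List[Tuple[int, int]]:
--     # Coverage set over the fixed (day, block) grid; no interval list, no sort, no merge pass.
--     covered = set()
--     for item in avail or []:
--         s = str(item).strip()
--         if not s:
--             continue
--         parts = s.split()
--         if len(parts) != 2:
--             continue
--         day, block = parts[0], parts[1].lower()
--         if day in DAY_TO_IDX and block in BLOCK_TO_RANGE:
--             covered.add((DAY_TO_IDX[day], block))
--     runs: List[Tuple[int, int]] = []
--     for d in range(7):
--         for b in _BLOCK_ORDER: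
--             if (d, b) in covered:
--                 s0, e0 = BLOCK_TO_RANGE[b]
--                 start, end = d * 1440 + s0, d * 1440 + e0
--                 if runs and runs[-1][1] == start:
--                     runs[-1] = (runs[-1][0], end)
--                 else:
--                     runs.append((start, end))
--     return runs
-- ===== Notes on version B (the rewrite author's own statement) =====
-- stated objective: alternative
-- what changed: Instead of collecting an interval list, sorting it and running a separate merge pass, B marks a coverage set over the fixed 7x4 (day, block) grid and emits merged runs in one ordered scan of that grid, extending the last run when blocks touch.
import Mathlib
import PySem

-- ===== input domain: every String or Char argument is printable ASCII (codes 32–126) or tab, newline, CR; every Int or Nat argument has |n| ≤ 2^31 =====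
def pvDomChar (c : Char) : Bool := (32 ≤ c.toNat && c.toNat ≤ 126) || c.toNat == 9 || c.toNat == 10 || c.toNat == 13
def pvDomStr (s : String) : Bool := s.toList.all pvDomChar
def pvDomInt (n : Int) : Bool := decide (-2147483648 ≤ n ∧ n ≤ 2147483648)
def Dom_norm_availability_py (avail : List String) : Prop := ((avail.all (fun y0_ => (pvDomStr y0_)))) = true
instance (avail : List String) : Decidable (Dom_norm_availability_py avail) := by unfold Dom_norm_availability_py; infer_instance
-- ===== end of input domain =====

-- B replaces A's collect-sort-merge pipeline by a coverage set over the fixed 7×4 (day, block)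
-- grid plus one ordered scan of that grid emitting merged runs (objective: alternative).

-- Shared lookup tables (identical literal dicts in both Python sources) and the parsing of one
-- item, which is line-for-line the same in A and B.
def pvDayDict : PySem.Dict String Int := PySem.Dict.ofList
  [("Mon", 0), ("Tue", 1), ("Wed", 2), ("Thu", 3), ("Fri", 4), ("Sat", 5), ("Sun", 6)]

def pvBlockDict : PySem.Dict String (Int × Int) := PySem.Dict.ofList
  [("morning", (540, 720)), ("afternoon", (720, 1020)), ("evening", (1020, 1260)), ("night", (1260, 1440))]

-- s = str(item).strip(); if not s: skip; parts = s.split(); if len(parts) != 2: skip;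
-- day, block = parts[0], parts[1].lower(); if day in DAY_TO_IDX and block in BLOCK_TO_RANGE: yield
def pvParse (item : String) : Option (Int × String × (Int × Int)) :=
  if PySem.Str.strip item = "" then none
  else match PySem.Str.split₀ (PySem.Str.strip item) with
    | [day, blockRaw] =>
      match PySem.Dict.get? pvDayDict day,
            PySem.Dict.get? pvBlockDict (PySem.Str.lower blockRaw) with
      | some d, some r => some (d, PySem.Str.lower blockRaw, r)
      | _, _ => none
    | _ => none

-- ===== PORT A =====
-- body of A's _merge_intervals loop: ps, pe = merged[-1]; if s <= pe: … else append
def pvMergeStep (merged : List (Int × Int)) (se : Int × Int) : List (Int × Int) :=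
  match merged.getLast? with
  | some (ps, pe) => if se.1 ≤ pe then merged.dropLast ++ [(ps, max pe se.2)] else merged ++ [se]
  | none => merged ++ [se]

def pvMerge (intervals : List (Int × Int)) : List (Int × Int) :=
  match intervals with
  | [] => []
  | first :: rest => rest.foldl pvMergeStep [first]

def norm_availability_py (avail : List String) : List (Int × Int) :=
  let intervals := avail.foldl (fun acc item =>
    match pvParse item with
    | some (d, _, r) => acc ++ [(d * 1440 + r.1, d * 1440 + r.2)]
    | none => acc) []
  pvMerge (PySem.List.sorted2 intervals Prod.fst Prod.snd)

-- ===== PORT B =====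
def pvBlockOrder : List String := ["morning", "afternoon", "evening", "night"]

-- body of B's grid loop: extend the last run when it touches, else append
def pvRunStep (runs : List (Int × Int)) (se : Int × Int) : List (Int × Int) :=
  match runs.getLast? with
  | some (ps, pe) => if pe == se.1 then runs.dropLast ++ [(ps, se.2)] else runs ++ [se]
  | none => runs ++ [se]

def norm_availability_py_alt (avail : List String) : List (Int × Int) :=
  let covered : PySem.Set (Int × String) := avail.foldl (fun cov item =>
    match pvParse item with
    | some (d, block, _) => PySem.Set.add cov (d, block)
    | none => cov) PySem.Set.empty
  (PySem.List.pyRange 0 7 1).foldl (fun runs d =>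
    pvBlockOrder.foldl (fun runs b =>
      if PySem.Set.contains covered (d, b) then
        match PySem.Dict.get? pvBlockDict b with
        | some r => pvRunStep runs (d * 1440 + r.1, d * 1440 + r.2)
        | none => runs
      else runs) runs) []

-- ===== PRECONDITION & SPEC =====
def Spec_norm_availability_py (avail : List String) (out : List (Int × Int)) : Prop := out = norm_availability_py_alt avail
instance (avail : List String) (out : List (Int × Int)) : Decidable (Spec_norm_availability_py avail out) := by unfold Spec_norm_availability_py; infer_instance

-- ===== CLAIM (what is proved, stated in full; the proofs are below) =====
def Claim_equal_norm_availability_py : Prop := ∀ (avail : List String), Dom_norm_availability_py avail → Spec_norm_availability_py avail (norm_availability_py avail)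

-- ===== LEMMAS AND PROOFS =====

-- Proof-only helpers: the grid in B's iteration order, and the minute interval of a grid cell.
def pvDbList : List (Int × String) :=
  ([0, 1, 2, 3, 4, 5, 6] : List Int).flatMap (fun d => pvBlockOrder.map (fun b => (d, b)))

def pvSlot (db : Int × String) : Int × Int :=
  match PySem.Dict.get? pvBlockDict db.2 with
  | some r => (db.1 * 1440 + r.1, db.1 * 1440 + r.2)
  | none => (0, 0)

def pvFoldA (avail : List String) : List (Int × Int) :=
  avail.foldl (fun acc item =>
    match pvParse item with
    | some (d, _, r) => acc ++ [(d * 1440 + r.1, d * 1440 + r.2)]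
    | none => acc) []

def pvFoldB (avail : List String) : PySem.Set (Int × String) :=
  avail.foldl (fun cov item =>
    match pvParse item with
    | some (d, block, _) => PySem.Set.add cov (d, block)
    | none => cov) PySem.Set.empty

-- both folds see the same parses: acc and cov describe the same covered cells
def pvInv (acc : List (Int × Int)) (cov : List (Int × String)) : Prop :=
  (∀ x ∈ acc, ∃ db, db ∈ pvDbList ∧ db ∈ cov ∧ x = pvSlot db) ∧
  (∀ db ∈ cov, db ∈ pvDbList ∧ pvSlot db ∈ acc)

lemma pvMerge_eq_foldl (l : List (Int × Int)) : pvMerge l = l.foldl pvMergeStep [] := by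
  cases l with
  | nil => rfl
  | cons x r => simp [pvMerge, List.foldl_cons, pvMergeStep]

lemma pvDay_cases {k : String} {d : Int} (h : PySem.Dict.get? pvDayDict k = some d) :
    d = 0 ∨ d = 1 ∨ d = 2 ∨ d = 3 ∨ d = 4 ∨ d = 5 ∨ d = 6 := by
  have e : pvDayDict = PySem.Dict.mk
      [("Mon", 0), ("Tue", 1), ("Wed", 2), ("Thu", 3), ("Fri", 4), ("Sat", 5), ("Sun", 6)] := by decide
  rw [e] at h
  simp [PySem.Dict.get?_mk_cons] at h
  split_ifs at h <;> simp_all [PySem.Dict.get?]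

lemma pvBlock_cases {k : String} {r : Int × Int} (h : PySem.Dict.get? pvBlockDict k = some r) :
    k = "morning" ∨ k = "afternoon" ∨ k = "evening" ∨ k = "night" := by
  have e : pvBlockDict = PySem.Dict.mk
      [("morning", (540, 720)), ("afternoon", (720, 1020)), ("evening", (1020, 1260)), ("night", (1260, 1440))] := by decide
  rw [e] at h
  simp [PySem.Dict.get?_mk_cons] at h
  split_ifs at h <;> simp_all [PySem.Dict.get?]

lemma pvParse_sound {item : String} {d : Int} {b : String} {r : Int × Int}
    (h : pvParse item = some (d, b, r)) :
    (d, b) ∈ pvDbList ∧ PySem.Dict.get? pvBlockDict b = some r := by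
  unfold pvParse at h
  split at h
  · exact absurd h (by simp)
  · split at h
    · split at h
      · rename_i day blockRaw hsplit o1 o2 d' r' hd hb
        obtain ⟨rfl, rfl, rfl⟩ : d' = d ∧ PySem.Str.lower blockRaw = b ∧ r' = r := by
          injection h with h'
          exact ⟨congrArg Prod.fst h', congrArg Prod.fst (congrArg Prod.snd h'),
                 congrArg Prod.snd (congrArg Prod.snd h')⟩
        refine ⟨?_, hb⟩
        rcases pvDay_cases hd with rfl | rfl | rfl | rfl | rfl | rfl | rfl <;>
          rcases pvBlock_cases hb with hk | hk | hk | hk <;> rw [hk] <;> decide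
      · exact absurd h (by simp)
    · exact absurd h (by simp)

lemma pvInv_fold (avail : List String) :
    ∀ (acc : List (Int × Int)) (cov : List (Int × String)), pvInv acc cov →
    pvInv (avail.foldl (fun acc item =>
      match pvParse item with
      | some (d, _, r) => acc ++ [(d * 1440 + r.1, d * 1440 + r.2)]
      | none => acc) acc)
      (avail.foldl (fun cov item =>
        match pvParse item with
        | some (d, block, _) => PySem.Set.add cov (d, block)
        | none => cov) cov) := by
  induction avail with
  | nil => intro acc cov inv; exact inv
  | cons item rest ih =>
    intro acc cov inv
    simp only [List.foldl_cons]
    cases hp : pvParse item with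
    | none => exact ih acc cov inv
    | some t =>
      obtain ⟨d, b, r⟩ := t
      apply ih
      obtain ⟨hmem, hget⟩ := pvParse_sound hp
      have hslot : pvSlot (d, b) = (d * 1440 + r.1, d * 1440 + r.2) := by
        simp [pvSlot, hget]
      constructor
      · intro x hx
        rcases List.mem_append.mp hx with hx | hx
        · obtain ⟨db, h1, h2, h3⟩ := inv.1 x hx
          exact ⟨db, h1, (PySem.Set.mem_add cov (d, b) db).mpr (Or.inl h2), h3⟩
        · have hx' : x = (d * 1440 + r.1, d * 1440 + r.2) := by simpa using hx
          exact ⟨(d, b), hmem, (PySem.Set.mem_add cov (d, b) (d, b)).mpr (Or.inr rfl),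
                 by rw [hx', hslot]⟩
      · intro db' hdb'
        rcases (PySem.Set.mem_add cov (d, b) db').mp hdb' with h' | rfl
        · obtain ⟨h1, h2⟩ := inv.2 db' h'
          exact ⟨h1, List.mem_append_left _ h2⟩
        · exact ⟨hmem, by rw [hslot]; exact List.mem_append_right _ (by simp)⟩

-- A's per-element merge step and B's run step agree when the incoming start is ≥ the last end
lemma pvStep_agree (acc : List (Int × Int)) (s : Int × Int) (hs : s.1 ≤ s.2)
    (h : ∀ lp : Int × Int, acc.getLast? = some lp → lp.2 ≤ s.1) :
    pvMergeStep acc s = pvRunStep acc s := by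
  unfold pvMergeStep pvRunStep
  cases hl : acc.getLast? with
  | none => rfl
  | some lp =>
    obtain ⟨ps, pe⟩ := lp
    have hpe : pe ≤ s.1 := h (ps, pe) hl
    by_cases hc : s.1 ≤ pe
    · have hps : pe = s.1 := le_antisymm hpe hc
      subst hps
      simp [max_eq_right hs]
    · have hne : (pe == s.1) = false := by
        apply beq_false_of_ne; omega
      simp [hc, hne]

lemma pvMergeStep_getLast (acc : List (Int × Int)) (s : Int × Int) (hs : s.1 ≤ s.2)
    (h : ∀ lp : Int × Int, acc.getLast? = some lp → lp.2 ≤ s.1) :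
    ∃ ps : Int, (pvMergeStep acc s).getLast? = some (ps, s.2) := by
  unfold pvMergeStep
  cases hl : acc.getLast? with
  | none => exact ⟨s.1, by simp⟩
  | some lp =>
    obtain ⟨ps, pe⟩ := lp
    have hpe : pe ≤ s.1 := h (ps, pe) hl
    by_cases hc : s.1 ≤ pe
    · have hmax : max pe s.2 = s.2 := max_eq_right (by omega)
      exact ⟨ps, by simp [hc, hmax]⟩
    · exact ⟨s.1, by simp [hc]⟩

lemma pvMergeStep_idem (acc : List (Int × Int)) (s : Int × Int) (hs : s.1 ≤ s.2)
    {lp : Int × Int} (h : acc.getLast? = some lp) (h2 : s.2 ≤ lp.2) :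
    pvMergeStep acc s = acc := by
  obtain ⟨l', rfl⟩ := List.getLast?_eq_some_iff.mp h
  obtain ⟨ps, pe⟩ := lp
  have hle : s.1 ≤ pe := by simp at h2 ⊢; omega
  have hmax : max pe s.2 = pe := max_eq_left (by simpa using h2)
  simp [pvMergeStep, hle, hmax]

lemma pvMergeStep_repeat (m : Nat) (acc : List (Int × Int)) (s : Int × Int) (hs : s.1 ≤ s.2)
    {lp : Int × Int} (h : acc.getLast? = some lp) (h2 : s.2 ≤ lp.2) :
    (List.replicate m s).foldl pvMergeStep acc = acc := by
  induction m with
  | zero => rfl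
  | succ m ih => rw [List.replicate_succ, List.foldl_cons, pvMergeStep_idem acc s hs h h2]; exact ih

lemma pvMerge_collapse (n : (Int × Int) → Nat) :
    ∀ (F : List (Int × String)) (acc : List (Int × Int)),
    (∀ db ∈ F, 1 ≤ n (pvSlot db) ∧ (pvSlot db).1 < (pvSlot db).2) →
    F.Pairwise (fun a b => (pvSlot a).2 ≤ (pvSlot b).1) →
    (∀ lp : Int × Int, acc.getLast? = some lp → ∀ db ∈ F, lp.2 ≤ (pvSlot db).1) →
    (F.flatMap fun db => List.replicate (n (pvSlot db)) (pvSlot db)).foldl pvMergeStep acc =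
    F.foldl (fun runs db => pvRunStep runs (pvSlot db)) acc := by
  intro F
  induction F with
  | nil => intro acc _ _ _; rfl
  | cons db F' ih =>
    intro acc hwf hpair hlast
    obtain ⟨hn, hse⟩ := hwf db (by simp)
    have hs : (pvSlot db).1 ≤ (pvSlot db).2 := le_of_lt hse
    have hlast1 : ∀ lp : Int × Int, acc.getLast? = some lp → lp.2 ≤ (pvSlot db).1 :=
      fun lp hl => hlast lp hl db (by simp)
    obtain ⟨m, hm⟩ : ∃ m, n (pvSlot db) = m + 1 :=
      ⟨n (pvSlot db) - 1, (Nat.succ_pred_eq_of_pos hn).symm⟩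
    obtain ⟨ps, hps⟩ := pvMergeStep_getLast acc (pvSlot db) hs hlast1
    simp only [List.flatMap_cons, List.foldl_append, List.foldl_cons, hm,
      List.replicate_succ]
    rw [pvMergeStep_repeat m _ _ hs hps (le_refl _)]
    rw [pvStep_agree acc _ hs hlast1]
    have hpair' := List.pairwise_cons.mp hpair
    rw [← pvStep_agree acc _ hs hlast1]
    apply ih
    · exact fun db' h' => hwf db' (by simp [h'])
    · exact hpair'.2
    · intro lp hl db' hdb'
      rw [hps] at hl
      obtain rfl : lp = (ps, (pvSlot db).2) := by injection hl with h'; exact h'.symm ▸ rfl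
      exact hpair'.1 db' hdb'
  

lemma pvCount_flatMap_replicate (l : List (Int × Int)) :
    ∀ (S : List (Int × Int)), S.Nodup → ∀ y : Int × Int,
    (S.flatMap fun x => List.replicate (l.count x) x).count y = if y ∈ S then l.count y else 0 := by
  intro S
  induction S with
  | nil => intro _ y; simp
  | cons x S' ih =>
    intro hnd y
    obtain ⟨hx, hnd'⟩ := List.nodup_cons.mp hnd
    simp only [List.flatMap_cons, List.count_append, List.count_replicate, ih hnd' y,
      List.mem_cons]
    by_cases hxy : x = y
    · subst hxy
      simp [hx]
    · simp [beq_false_of_ne hxy, Ne.symm hxy]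

lemma pvPerm_flatMap_replicate (l S : List (Int × Int)) (hnd : S.Nodup)
    (hsub : ∀ x ∈ l, x ∈ S) :
    (S.flatMap fun x => List.replicate (l.count x) x).Perm l := by
  refine List.perm_iff_count.mpr fun y => ?_
  rw [pvCount_flatMap_replicate l S hnd y]
  split
  case isTrue => rfl
  case isFalse h' => exact (List.count_eq_zero.mpr (fun hy => h' (hsub y hy))).symm

lemma pvPairwise_flatMap_replicate (S : List (Int × Int)) (n : (Int × Int) → Nat) :
    S.Pairwise (fun a b => (toLex a : Int ×ₗ Int) < toLex b) →
    (S.flatMap fun x => List.replicate (n x) x).Pairwise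
      (fun a b => (toLex a : Int ×ₗ Int) ≤ toLex b) := by
  induction S with
  | nil => intro _; simp
  | cons x S' ih =>
    intro h
    obtain ⟨hx, h'⟩ := List.pairwise_cons.mp h
    simp only [List.flatMap_cons]
    rw [List.pairwise_append]
    refine ⟨List.pairwise_replicate.mpr (Or.inr le_rfl), ih h', ?_⟩
    intro a ha b hb
    obtain rfl := List.eq_of_mem_replicate ha
    obtain ⟨y, hy, hb'⟩ := List.mem_flatMap.mp hb
    obtain rfl := List.eq_of_mem_replicate hb'
    exact le_of_lt (hx b hy)

lemma pvSorted2_eq_sorted_lex (xs : List (Int × Int)) :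
    PySem.List.sorted2 xs Prod.fst Prod.snd =
    PySem.List.sorted xs (fun p => (toLex p : Int ×ₗ Int)) := by
  have hfun : (fun (a b : Int × Int) =>
        (decide (a.1 < b.1) || (!decide (b.1 < a.1) && decide (a.2 < b.2)))) =
      (fun (a b : Int × Int) => decide ((toLex a : Int ×ₗ Int) < toLex b)) := by
    funext a b
    have hiff : (a.1 < b.1 ∨ ¬ b.1 < a.1 ∧ a.2 < b.2) ↔ ((toLex a : Int ×ₗ Int) < toLex b) := by
      rw [Prod.Lex.lt_iff]
      simp only [ofLex_toLex]
      constructor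
      · rintro (h' | ⟨h1, h2⟩)
        · exact Or.inl h'
        · rcases lt_trichotomy a.1 b.1 with h3 | h3 | h3
          · exact Or.inl h3
          · exact Or.inr ⟨h3, h2⟩
          · exact absurd h3 h1
      · rintro (h' | ⟨h1, h2⟩)
        · exact Or.inl h'
        · exact Or.inr ⟨by omega, h2⟩
    calc (decide (a.1 < b.1) || (!decide (b.1 < a.1) && decide (a.2 < b.2)))
        = decide (a.1 < b.1 ∨ ¬ b.1 < a.1 ∧ a.2 < b.2) := by
          simp only [Bool.decide_or, Bool.decide_and, decide_not]
      _ = decide ((toLex a : Int ×ₗ Int) < toLex b) := decide_eq_decide.mpr hiff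
  show List.foldl (fun acc x => PySem.List.insertBy (fun (a b : Int × Int) =>
        (decide (a.1 < b.1) || (!decide (b.1 < a.1) && decide (a.2 < b.2)))) x acc) [] xs =
      List.foldl (fun acc x => PySem.List.insertBy (fun (a b : Int × Int) =>
        decide ((toLex a : Int ×ₗ Int) < toLex b)) x acc) [] xs
  rw [hfun]

lemma pvAlt_eq_grid (avail : List String) :
    norm_availability_py_alt avail =
    pvDbList.foldl (fun runs db =>
      if PySem.Set.contains (pvFoldB avail) db then pvRunStep runs (pvSlot db) else runs) [] := by
  show (PySem.List.pyRange 0 7 1).foldl (fun runs d =>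
      pvBlockOrder.foldl (fun runs b =>
        if PySem.Set.contains (pvFoldB avail) (d, b) then
          match PySem.Dict.get? pvBlockDict b with
          | some r => pvRunStep runs (d * 1440 + r.1, d * 1440 + r.2)
          | none => runs
        else runs) runs) [] = _
  have h : PySem.List.pyRange 0 7 1 = [0, 1, 2, 3, 4, 5, 6] := by decide
  rw [pvDbList, List.foldl_flatMap, h]
  apply PySem.List.foldl_congr_mem
  intro acc d _
  rw [List.foldl_map]
  apply PySem.List.foldl_congr_mem
  intro acc' b hb
  simp only [pvBlockOrder, List.mem_cons, List.not_mem_nil, or_false] at hb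
  rcases hb with rfl | rfl | rfl | rfl <;> rfl

-- decidable geometric facts about the 28 grid slots
lemma pvDec_wf : ∀ db ∈ pvDbList, (pvSlot db).1 < (pvSlot db).2 := by decide
lemma pvDec_rel : pvDbList.Pairwise (fun a b => (pvSlot a).2 ≤ (pvSlot b).1) := by decide
lemma pvDec_start : pvDbList.Pairwise (fun a b => (pvSlot a).1 < (pvSlot b).1) := by decide

theorem pv_main (avail : List String) :
    norm_availability_py avail = norm_availability_py_alt avail := by
  have inv : pvInv (pvFoldA avail) (pvFoldB avail) :=
    pvInv_fold avail [] [] ⟨by simp, by simp⟩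
  set I := pvFoldA avail with hI
  set cov := pvFoldB avail with hcov
  set F := pvDbList.filter (fun db => PySem.Set.contains cov db) with hF
  have hFmem : ∀ db ∈ F, db ∈ pvDbList ∧ db ∈ cov := by
    intro db h'
    have h'' := List.mem_filter.mp h'
    exact ⟨h''.1, List.contains_iff_mem.mp h''.2⟩
  have hS_start : (F.map pvSlot).Pairwise (fun x y => x.1 < y.1) :=
    List.pairwise_map.mpr (pvDec_start.filter _)
  have hS_nodup : (F.map pvSlot).Nodup :=
    hS_start.imp (fun h' => fun e => absurd (by rw [e] at h'; exact h') (lt_irrefl _))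
  have hS_lt : (F.map pvSlot).Pairwise (fun a b => (toLex a : Int ×ₗ Int) < toLex b) :=
    hS_start.imp (fun h' => Prod.Lex.lt_iff.mpr (Or.inl h'))
  have hsub : ∀ x ∈ I, x ∈ F.map pvSlot := by
    intro x hx
    obtain ⟨db, h1, h2, h3⟩ := inv.1 x hx
    refine List.mem_map.mpr ⟨db, List.mem_filter.mpr ⟨h1, List.contains_iff_mem.mpr h2⟩, h3.symm⟩
  have hsorted : PySem.List.sorted I (fun p => (toLex p : Int ×ₗ Int)) =
      (F.map pvSlot).flatMap (fun x => List.replicate (I.count x) x) :=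
    PySem.List.eq_of_perm_of_pairwise_le_of_injective
      (fun p => (toLex p : Int ×ₗ Int)) (fun _ _ h' => toLex.injective h')
      ((PySem.List.sorted_perm I _ false).trans
        (pvPerm_flatMap_replicate I (F.map pvSlot) hS_nodup hsub).symm)
      (PySem.List.sorted_pairwise I _)
      (pvPairwise_flatMap_replicate (F.map pvSlot) _ hS_lt)
  calc norm_availability_py avail
      = (PySem.List.sorted2 I Prod.fst Prod.snd).foldl pvMergeStep [] := by
        rw [show norm_availability_py avail =
            pvMerge (PySem.List.sorted2 I Prod.fst Prod.snd) from rfl, pvMerge_eq_foldl]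
    _ = (PySem.List.sorted I (fun p => (toLex p : Int ×ₗ Int))).foldl pvMergeStep [] := by
        rw [pvSorted2_eq_sorted_lex]
    _ = (F.flatMap fun db => List.replicate (I.count (pvSlot db)) (pvSlot db)).foldl
          pvMergeStep [] := by
        rw [hsorted, List.flatMap_map]
    _ = F.foldl (fun runs db => pvRunStep runs (pvSlot db)) [] := by
        refine pvMerge_collapse (fun x => List.count x I) F [] ?_ ?_ ?_
        · intro db h'
          obtain ⟨h1, h2⟩ := hFmem db h'
          exact ⟨List.count_pos_iff.mpr ((inv.2 db h2).2), pvDec_wf db h1⟩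
        · exact pvDec_rel.filter _
        · intro lp hl
          simp at hl
    _ = pvDbList.foldl (fun runs db =>
          if PySem.Set.contains cov db then pvRunStep runs (pvSlot db) else runs) [] :=
        (PySem.List.foldl_if_eq_foldl_filter _ _ _ _).symm
    _ = norm_availability_py_alt avail := (pvAlt_eq_grid avail).symm

-- ===== VERDICT (by name: the statement is the Claim_ definition above) =====
theorem norm_availability_py_spec : Claim_equal_norm_availability_py := by
  intro avail _
  unfold Spec_norm_availability_py
  exact pv_main avail
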